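-- pv_equiv track=rewrite | github.com/awong05/GeeksforGeeks | strings.py | get_largest_word
-- ===== SOURCE A (Python) =====
-- def get_largest_word(d, s):
--     match = ''
--     for word in d:
--         if len(word) > len(s):
--             continue
--         word_scanner, s_scanner = 0, 0
--         while word_scanner < len(word) and s_scanner < len(s):
--             if s[s_scanner] != word[word_scanner]:
--                 s_scanner += 1
--             else:
--                 s_scanner += 1
--                 word_scanner += 1
--         if word_scanner == len(word):
--             if len(word) > len(match):
--                 match = word
--         if s_scanner == len(s):
--             continue
--     return match
-- ===== SOURCE B (Python) =====
-- def get_largest_word(d, s):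
--     index = {}
--     for i, c in enumerate(s):
--         index.setdefault(c, []).append(i)
--     match = ''
--     for word in d:
--         pos = 0
--         ok = True
--         for c in word:
--             hit = None
--             for i in index.get(c, []):
--                 if i >= pos:
--                     hit = i
--                     break
--             if hit is None:
--                 ok = False
--                 break
--             pos = hit + 1
--         if ok and len(word) > len(match):
--             match = word
--     return match
-- ===== Notes on version B (the rewrite author's own statement) =====
-- stated objective: faster
-- what changed: Replaces the per-word two-pointer scan over all of s by a one-pass occurrence index (char -> sorted position list) built once; each word is then matched by walking only its characters' occurrence lists for the first position past the cursor, so characters of s not occurring in the word are never touched.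
import Mathlib
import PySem

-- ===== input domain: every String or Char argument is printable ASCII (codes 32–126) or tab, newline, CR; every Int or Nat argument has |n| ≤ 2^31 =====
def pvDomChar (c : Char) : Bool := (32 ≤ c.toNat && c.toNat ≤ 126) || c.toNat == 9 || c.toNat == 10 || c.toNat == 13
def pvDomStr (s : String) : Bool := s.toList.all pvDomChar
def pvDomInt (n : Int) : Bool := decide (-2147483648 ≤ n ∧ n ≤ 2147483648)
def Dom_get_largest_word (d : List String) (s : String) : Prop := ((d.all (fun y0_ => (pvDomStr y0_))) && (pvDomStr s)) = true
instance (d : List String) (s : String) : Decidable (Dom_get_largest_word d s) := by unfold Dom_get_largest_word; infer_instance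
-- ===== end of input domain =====

-- B replaces A's per-word two-pointer scan of s by a character->positions index built once,
-- scanning only occurrence lists per word; same return value, alternative algorithm.

-- ===== PORT A =====
-- A's inner while loop over (word_scanner, s_scanner)
def pvALoop (w s : List Char) (ws ss : Nat) : Nat × Nat :=
  if h : ws < w.length ∧ ss < s.length then
    if s[ss]'h.2 ≠ w[ws]'h.1 then pvALoop w s ws (ss + 1)
    else pvALoop w s (ws + 1) (ss + 1)
  else (ws, ss)
termination_by s.length - ss

def get_largest_word (d : List String) (s : String) : String :=
  d.foldl (fun m word =>
    if word.toList.length > s.toList.length then m  -- continue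
    else
      let r := pvALoop word.toList s.toList 0 0
      -- 'if s_scanner == len(s): continue' at the end of A's loop body is a no-op
      if r.1 = word.toList.length then
        (if word.toList.length > m.toList.length then word else m)
      else m) ""

-- ===== PORT B =====
-- inner for-loop with break: first element of l that is >= pos
def pvFirstGE (l : List Int) (pos : Int) : Option Int :=
  l.find? (fun i => decide (pos ≤ i))

-- index = {}; for i, c in enumerate(s): index.setdefault(c, []).append(i)
def pvBuildIndex (s : List Char) : PySem.Dict Char (List Int) :=
  (PySem.List.enumerate s).foldl
    (fun d ic => d.insert ic.2 (d.getD ic.2 [] ++ [ic.1])) PySem.Dict.empty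

-- the per-word loop: cursor pos, fail (False) as soon as some char has no position >= pos
def pvMatchGo (idx : PySem.Dict Char (List Int)) (pos : Int) : List Char → Bool
  | [] => true
  | c :: cs =>
    match pvFirstGE (idx.getD c []) pos with
    | none => false
    | some i => pvMatchGo idx (i + 1) cs

def get_largest_word_alt (d : List String) (s : String) : String :=
  let idx := pvBuildIndex s.toList
  d.foldl (fun m word =>
    if pvMatchGo idx 0 word.toList && decide (word.toList.length > m.toList.length)
    then word else m) ""

-- ===== PRECONDITION & SPEC =====
def Spec_get_largest_word (d : List String) (s : String) (out : String) : Prop := out = get_largest_word_alt d s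
instance (d : List String) (s : String) (out : String) : Decidable (Spec_get_largest_word d s out) := by unfold Spec_get_largest_word; infer_instance

-- ===== CLAIM (what is proved, stated in full; the proofs are below) =====
def Claim_equal_get_largest_word : Prop := ∀ (d : List String) (s : String), Dom_get_largest_word d s → Spec_get_largest_word d s (get_largest_word d s)

-- ===== LEMMAS AND PROOFS =====

-- the common specification: greedy subsequence check
def pvSubChk : List Char → List Char → Bool
  | [], _ => true
  | _ :: _, [] => false
  | c :: cs, x :: xs => if x = c then pvSubChk cs xs else pvSubChk (c :: cs) xs

-- positions (as Int) of the occurrences of c in t, offset by k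
def pvIdxFrom (c : Char) : Nat → List Char → List Int
  | _, [] => []
  | k, x :: xs => if x = c then (k : Int) :: pvIdxFrom c (k + 1) xs else pvIdxFrom c (k + 1) xs

theorem pvBuildIndex_fold (c : Char) (t : List Char) :
    ∀ (k : Nat) (d : PySem.Dict Char (List Int)),
      ((PySem.List.enumerate t (k : Int)).foldl
        (fun d ic => d.insert ic.2 (d.getD ic.2 [] ++ [ic.1])) d).getD c []
      = d.getD c [] ++ pvIdxFrom c k t := by
  induction t with
  | nil => intro k d; simp [PySem.List.enumerate_nil, pvIdxFrom]
  | cons x xs ih =>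
    intro k d
    rw [PySem.List.enumerate_cons, List.foldl_cons]
    have : ((k : Int) + 1) = ((k + 1 : Nat) : Int) := by push_cast; ring
    rw [this, ih (k + 1)]
    simp only [PySem.Dict.getD_insert, pvIdxFrom]
    by_cases hc : c = x
    · subst hc; simp
    · have hxc : ¬ x = c := fun h => hc h.symm
      simp [hc, hxc]

theorem pvBuildIndex_getD (s : List Char) (c : Char) :
    (pvBuildIndex s).getD c [] = pvIdxFrom c 0 s := by
  have := pvBuildIndex_fold c s 0 PySem.Dict.empty
  simpa [pvBuildIndex] using this

theorem pvIdxFrom_ge (c : Char) (t : List Char) :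
    ∀ (k : Nat) (i : Int), i ∈ pvIdxFrom c k t → (k : Int) ≤ i := by
  induction t with
  | nil => intro k i h; simp [pvIdxFrom] at h
  | cons x xs ih =>
    intro k i h
    simp only [pvIdxFrom] at h
    split at h
    · rcases List.mem_cons.mp h with h | h
      · omega
      · have := ih (k + 1) i h; push_cast at this ⊢; omega
    · have := ih (k + 1) i h; push_cast at this ⊢; omega

theorem pvFirstGE_head (c : Char) (t : List Char) (k : Nat) :
    pvFirstGE (pvIdxFrom c k t) (k : Int) = (pvIdxFrom c k t).head? := by
  cases hl : pvIdxFrom c k t with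
  | nil => simp [pvFirstGE]
  | cons a l =>
    have ha : (k : Int) ≤ a := pvIdxFrom_ge c t k a (by rw [hl]; exact List.mem_cons_self)
    simp [pvFirstGE, ha]

theorem pvFirstGE_shift (c : Char) : ∀ (t : List Char) (k pos : Nat), k ≤ pos →
    pvFirstGE (pvIdxFrom c k t) (pos : Int) = (pvIdxFrom c pos (t.drop (pos - k))).head? := by
  intro t k pos
  induction t generalizing k with
  | nil => intro _; simp [pvIdxFrom, pvFirstGE]
  | cons x xs ih =>
    intro hk
    rcases Nat.eq_or_lt_of_le hk with heq | hlt
    · subst heq; simpa using pvFirstGE_head c (x :: xs) k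
    · have hdk : pos - k = (pos - (k + 1)) + 1 := by omega
      have hdrop : (x :: xs).drop (pos - k) = xs.drop (pos - (k + 1)) := by
        rw [hdk]; rfl
      rw [hdrop]
      simp only [pvIdxFrom]
      by_cases hx : x = c
      · rw [if_pos hx]
        simp only [pvFirstGE]
        rw [List.find?_cons_of_neg (by simp; omega)]
        exact ih (k + 1) hlt
      · rw [if_neg hx]
        exact ih (k + 1) hlt

theorem pvMatchGo_eq_subChk (s : List Char) : ∀ (w : List Char) (pos : Nat),
    pvMatchGo (pvBuildIndex s) (pos : Int) w = pvSubChk w (s.drop pos) := by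
  intro w pos
  induction hn : w.length + (s.length - pos) using Nat.strong_induction_on generalizing w pos with
  | _ n ih =>
  cases w with
  | nil => cases s.drop pos <;> simp [pvMatchGo, pvSubChk]
  | cons c cs =>
    rw [pvMatchGo, pvBuildIndex_getD, pvFirstGE_shift c s 0 pos (Nat.zero_le _)]
    simp only [Nat.sub_zero]
    cases hd : s.drop pos with
    | nil => simp [pvIdxFrom, pvSubChk]
    | cons x xs =>
      have hxs : s.drop (pos + 1) = xs := by
        rw [← List.tail_drop, hd]; rfl
      have hpos : pos < s.length := by
        by_contra h
        rw [List.drop_eq_nil_of_le (by omega)] at hd; exact absurd hd (by simp)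
      have hlt1 : cs.length + (s.length - (pos + 1)) < n := by
        simp only [List.length_cons] at hn; omega
      have hlt2 : (c :: cs).length + (s.length - (pos + 1)) < n := by
        simp only [List.length_cons] at hn ⊢; omega
      by_cases hx : x = c
      · simp only [pvIdxFrom]
        rw [if_pos hx, List.head?_cons]
        show pvMatchGo (pvBuildIndex s) ((pos : Int) + 1) cs = pvSubChk (c :: cs) (x :: xs)
        have h1 : (pos : Int) + 1 = ((pos + 1 : Nat) : Int) := by push_cast; ring
        rw [h1, ih (cs.length + (s.length - (pos + 1))) hlt1 cs (pos + 1) rfl]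
        rw [hxs, pvSubChk, if_pos hx]
      · simp only [pvIdxFrom]
        rw [if_neg hx]
        have hshift := pvFirstGE_shift c s 0 (pos + 1) (Nat.zero_le _)
        simp only [Nat.sub_zero] at hshift
        rw [← hxs, ← hshift, ← pvBuildIndex_getD]
        have hrec := ih ((c :: cs).length + (s.length - (pos + 1))) hlt2
          (c :: cs) (pos + 1) rfl
        rw [pvMatchGo] at hrec
        rw [hrec, hxs]
        simp [pvSubChk, hx]

theorem pvALoop_eq_subChk (w s : List Char) : ∀ (ss ws : Nat), ws ≤ w.length → ss ≤ s.length →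
    (decide ((pvALoop w s ws ss).1 = w.length)) = pvSubChk (w.drop ws) (s.drop ss) := by
  intro ss
  induction hn : s.length - ss using Nat.strong_induction_on generalizing ss with
  | _ n ih =>
  intro ws hws hss
  rw [pvALoop]
  by_cases h : ws < w.length ∧ ss < s.length
  · rw [dif_pos h]
    have hwdrop : w.drop ws = w[ws] :: w.drop (ws + 1) := List.drop_eq_getElem_cons h.1
    have hsdrop : s.drop ss = s[ss] :: s.drop (ss + 1) := List.drop_eq_getElem_cons h.2
    by_cases hne : s[ss]'h.2 ≠ w[ws]'h.1
    · rw [if_pos hne, ih (s.length - (ss + 1)) (by omega) (ss + 1) rfl ws hws (by omega)]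
      rw [hwdrop, hsdrop, pvSubChk, if_neg (by simpa using hne)]
    · rw [if_neg hne]
      rw [ih (s.length - (ss + 1)) (by omega) (ss + 1) rfl (ws + 1) (by omega) (by omega)]
      rw [hwdrop, hsdrop, pvSubChk, if_pos (by simpa using hne)]
  · rw [dif_neg h]
    rcases Nat.lt_or_ge ws w.length with hlt | hge
    · have hse : ss = s.length := by omega
      have : w.drop ws ≠ [] := by simp; omega
      rw [hse, List.drop_length]
      cases hwd : w.drop ws with
      | nil => exact absurd hwd this
      | cons a l => simp [pvSubChk]; omega
    · have hwe : ws = w.length := by omega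
      rw [hwe, List.drop_length]
      simp [pvSubChk]

theorem pvSubChk_length : ∀ (w t : List Char), pvSubChk w t = true → w.length ≤ t.length := by
  intro w t
  induction t generalizing w with
  | nil => cases w <;> simp [pvSubChk]
  | cons x xs ih =>
    cases w with
    | nil => simp
    | cons c cs =>
      rw [pvSubChk]
      by_cases hx : x = c
      · rw [if_pos hx]; intro h; have := ih cs h; simpa using this
      · rw [if_neg hx]; intro h; have := ih (c :: cs) h; simp at this ⊢; omega

-- ===== VERDICT (by name: the statement is the Claim_ definition above) =====
theorem get_largest_word_spec : Claim_equal_get_largest_word := by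
  intro d s _
  unfold Spec_get_largest_word get_largest_word get_largest_word_alt
  have hstep : (fun (m word : String) =>
      if word.toList.length > s.toList.length then m
      else
        if (pvALoop word.toList s.toList 0 0).1 = word.toList.length then
          (if word.toList.length > m.toList.length then word else m)
        else m)
    = (fun (m word : String) =>
      if pvMatchGo (pvBuildIndex s.toList) 0 word.toList
          && decide (word.toList.length > m.toList.length)
      then word else m) := by
    funext m word
    have hmg : pvMatchGo (pvBuildIndex s.toList) 0 word.toList
        = pvSubChk word.toList s.toList := by
      have := pvMatchGo_eq_subChk s.toList word.toList 0
      simpa using this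
    have hal : (decide ((pvALoop word.toList s.toList 0 0).1 = word.toList.length))
        = pvSubChk word.toList s.toList := by
      have := pvALoop_eq_subChk word.toList s.toList 0 0 (Nat.zero_le _) (Nat.zero_le _)
      simpa using this
    by_cases hlong : word.toList.length > s.toList.length
    · rw [if_pos hlong]
      have hfalse : pvSubChk word.toList s.toList = false := by
        by_contra h
        have := pvSubChk_length word.toList s.toList (by simpa using h)
        omega
      rw [hmg, hfalse]
      simp
    · rw [if_neg hlong, hmg]
      by_cases hsub : pvSubChk word.toList s.toList = true
      · rw [hsub]
        have : (pvALoop word.toList s.toList 0 0).1 = word.toList.length := by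
          have := hal; rw [hsub] at this; simpa using this
        rw [if_pos this]
        simp only [Bool.true_and]
        by_cases hgt : word.toList.length > m.toList.length
        · rw [if_pos hgt, if_pos (decide_eq_true hgt)]
        · rw [if_neg hgt, if_neg (by simpa using hgt :
            ¬ (decide (word.toList.length > m.toList.length) = true))]
      · have hf : pvSubChk word.toList s.toList = false := by
          cases hh : pvSubChk word.toList s.toList
          · rfl
          · exact absurd hh hsub
        rw [hf]
        have : ¬ (pvALoop word.toList s.toList 0 0).1 = word.toList.length := by
          intro hc
          rw [← hal] at hf
          simp [hc] at hf
        rw [if_neg this]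
        simp
  rw [hstep]
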